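-- pv_equiv track=rewrite | github.com/Ypz22/Universidad | TercerSemestre/Segundo Parcial/Modelos discretos/P3_D1_NRC14545_Yepez_Jefferson/P3_D2_NRC14546_Parra_Sebastian/P3_D2_NRC14546_Parra_Sebastian/P3_D2_NRC14546_Parra_Sebastian_No_3.py | PostOrden1
-- ===== SOURCE A (Python) =====
-- edges1 = [
--     ('A', 'B'), ('A', 'C'), ('B','H'),('C','D'),
--     ('H','I'),('H','J'),('I','K'),('K','L'),('K','M'),
--     ('D','E'),('E','F'),('E','G')
-- ]
--
-- def encontrarHijos1(nodo, arista):
--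
--     hijos = []
--
--     for arista in edges1:
--         padre, hijo = arista
--         if padre == nodo:
--             hijos.append(hijo)
--     return hijos
--
-- def PostOrden1(nodo, edges, visitados = None):
--     if visitados is None:
--         visitados = []
--
--     hijos = encontrarHijos1(nodo, edges)
--
--     if hijos:
--         PostOrden1(hijos[0],edges,visitados)
--
--     if len(hijos)>1:
--         PostOrden1(hijos[1],edges,visitados)
--
--     visitados.append(nodo)
--
--     return visitados
-- ===== SOURCE B (Python) =====
-- # B: precompute the parent->children map from the module fixed edge list once,
-- # then do one recursive traversal over that map (A re-scans the whole edge list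
-- # at every node and, like A, the `edges` parameter is ignored in favour of the
-- # module-level edges1; like A, B appends to `visitados` in place).
-- edges1 = [
--     ('A', 'B'), ('A', 'C'), ('B','H'),('C','D'),
--     ('H','I'),('H','J'),('I','K'),('K','L'),('K','M'),
--     ('D','E'),('E','F'),('E','G')
-- ]
--
-- _CHILDREN = {}
-- for _p, _c in edges1:
--     _CHILDREN.setdefault(_p, []).append(_c)
--
-- def PostOrden1(nodo, edges, visitados=None):
--     if visitados is None:
--         visitados = []
--     for hijo in _CHILDREN.get(nodo, []):
--         PostOrden1(hijo, edges, visitados)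
--     visitados.append(nodo)
--     return visitados
-- ===== Notes on version B (the rewrite author's own statement) =====
-- stated objective: alternative
-- what changed: B builds the parent->children dictionary from the module's fixed edge list once at import time and does a single recursion over that map (one loop over all children of a node), instead of A's re-filtering of the entire edge list at every visited node with two hard-coded child calls; since both A and B ignore the `edges` parameter and work over the fixed 12-edge global edges1, running time does not scale with the input.
import Mathlib
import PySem

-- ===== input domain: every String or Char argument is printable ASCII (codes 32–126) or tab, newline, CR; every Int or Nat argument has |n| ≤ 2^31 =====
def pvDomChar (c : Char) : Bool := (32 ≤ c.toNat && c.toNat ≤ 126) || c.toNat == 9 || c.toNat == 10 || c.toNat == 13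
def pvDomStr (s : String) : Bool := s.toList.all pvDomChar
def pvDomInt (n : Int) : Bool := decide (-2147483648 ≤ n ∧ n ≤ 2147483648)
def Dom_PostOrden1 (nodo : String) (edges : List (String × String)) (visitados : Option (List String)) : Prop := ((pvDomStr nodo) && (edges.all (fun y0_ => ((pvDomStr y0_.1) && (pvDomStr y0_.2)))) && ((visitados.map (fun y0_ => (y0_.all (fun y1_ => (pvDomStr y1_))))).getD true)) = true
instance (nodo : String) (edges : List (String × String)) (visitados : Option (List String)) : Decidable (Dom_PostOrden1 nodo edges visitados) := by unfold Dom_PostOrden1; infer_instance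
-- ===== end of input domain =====

-- B precomputes the parent→children map of the module's fixed edge list edges1 once and
-- recurses over that map, where A re-filters the whole edge list at every visited node
-- (a structural change, not a measured speed-up: the recursion runs over the fixed 12-edge tree).
-- Like A (whose helper reads the global edges1), B ignores the `edges` parameter; in
-- Python both A and B append to `visitados` in place, equivalence is about the return value.

-- ===== PORT A =====
def edges1 : List (String × String) :=
  [("A","B"),("A","C"),("B","H"),("C","D"),("H","I"),("H","J"),
   ("I","K"),("K","L"),("K","M"),("D","E"),("E","F"),("E","G")]

-- the for-loop over the GLOBAL edges1 (the `arista` parameter is shadowed by the loop variable)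
def encontrarHijos1 (nodo : String) (arista : List (String × String)) : List String :=
  edges1.foldl (fun hijos arista => if arista.1 == nodo then hijos ++ [arista.2] else hijos) []

-- ---- termination machinery for the ports (the recursion runs over the fixed tree edges1) ----
lemma encontrarHijos1_filter (nodo : String) (e : List (String × String)) :
    encontrarHijos1 nodo e = (edges1.filter (fun p => p.1 == nodo)).map (·.2) := by
  exact PySem.List.foldl_append_if (l := edges1) (fun p => p.1 == nodo) (fun p => p.2) []

-- depth of a node in the fixed tree; used only as the termination measure
def pvRank (n : String) : Nat :=
  if n = "A" then 5 else if n = "B" then 4 else if n = "C" then 3 else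
  if n = "H" then 3 else if n = "D" then 2 else if n = "I" then 2 else
  if n = "E" then 1 else if n = "K" then 1 else 0

-- children of any node, in closed form (edges1 is a fixed literal)
lemma children_char (nodo : String) :
    (edges1.filter (fun p => p.1 == nodo)).map (·.2) =
      if nodo = "A" then ["B","C"] else if nodo = "B" then ["H"] else
      if nodo = "C" then ["D"] else if nodo = "H" then ["I","J"] else
      if nodo = "I" then ["K"] else if nodo = "K" then ["L","M"] else
      if nodo = "D" then ["E"] else if nodo = "E" then ["F","G"] else [] := by
  by_cases hA : nodo = "A"; · subst hA; decide
  by_cases hB : nodo = "B"; · subst hB; decide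
  by_cases hC : nodo = "C"; · subst hC; decide
  by_cases hH : nodo = "H"; · subst hH; decide
  by_cases hI : nodo = "I"; · subst hI; decide
  by_cases hK : nodo = "K"; · subst hK; decide
  by_cases hD : nodo = "D"; · subst hD; decide
  by_cases hE : nodo = "E"; · subst hE; decide
  simp [edges1, beq_iff_eq, Ne.symm hA, Ne.symm hB, Ne.symm hC, Ne.symm hH,
        Ne.symm hI, Ne.symm hK, Ne.symm hD, Ne.symm hE, hA, hB, hC, hH, hI, hK, hD, hE]

lemma pvRank_head (nodo : String) (e : List (String × String)) (h0 : String)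
    (hh : (encontrarHijos1 nodo e).head? = some h0) : pvRank h0 < pvRank nodo := by
  rw [encontrarHijos1_filter, children_char] at hh
  split_ifs at hh <;> simp_all <;> subst_vars <;> simp [pvRank]

lemma pvRank_second (nodo : String) (e : List (String × String)) (h1 : String)
    (hh : (encontrarHijos1 nodo e)[1]? = some h1) : pvRank h1 < pvRank nodo := by
  rw [encontrarHijos1_filter, children_char] at hh
  split_ifs at hh <;> simp_all <;> subst_vars <;> simp [pvRank]
-- ---- end termination machinery ----

def PostOrden1 (nodo : String) (edges : List (String × String)) (visitados : Option (List String)) : List String :=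
  let vis := visitados.getD []                -- if visitados is None: visitados = []
  let hijos := encontrarHijos1 nodo edges
  let vis1 := match hh : hijos.head? with     -- if hijos: PostOrden1(hijos[0], edges, visitados)
    | some h0 => PostOrden1 h0 edges (some vis)
    | none => vis
  let vis2 := match hh2 : hijos[1]? with      -- if len(hijos) > 1: PostOrden1(hijos[1], edges, visitados)
    | some h1 => PostOrden1 h1 edges (some vis1)
    | none => vis1
  vis2 ++ [nodo]                              -- visitados.append(nodo); return visitados
termination_by pvRank nodo
decreasing_by
  · exact pvRank_head nodo edges _ hh
  · exact pvRank_second nodo edges _ hh2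

-- ===== PORT B =====
-- _CHILDREN: the dict built once from edges1 (_CHILDREN.setdefault(p, []).append(c))
def pvChildren : PySem.Dict String (List String) :=
  edges1.foldl (fun d pc => d.modify pc.1 [] (· ++ [pc.2])) PySem.Dict.empty

lemma pvChildren_filter (nodo : String) :
    pvChildren.getD nodo [] = (edges1.filter (fun p => p.1 == nodo)).map (·.2) := by
  simp [pvChildren, PySem.Dict.getD_foldl_modify_append]

lemma pvRank_child (nodo c : String) (hc : c ∈ pvChildren.getD nodo []) :
    pvRank c < pvRank nodo := by
  rw [pvChildren_filter, children_char] at hc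
  split_ifs at hc <;> simp_all <;> rcases hc with rfl | rfl <;> subst_vars <;> simp [pvRank]

def PostOrden1_alt (nodo : String) (edges : List (String × String)) (visitados : Option (List String)) : List String :=
  let vis := visitados.getD []                       -- if visitados is None: visitados = []
  let vis := (pvChildren.getD nodo []).attach.foldl  -- for hijo in _CHILDREN.get(nodo, []): recurse
    (fun v c => PostOrden1_alt c.1 edges (some v)) vis
  vis ++ [nodo]                                      -- visitados.append(nodo); return visitados
termination_by pvRank nodo
decreasing_by exact pvRank_child nodo c.1 c.2

-- ===== PRECONDITION & SPEC =====
def Spec_PostOrden1 (nodo : String) (edges : List (String × String)) (visitados : Option (List String)) (out : List String) : Prop := out = PostOrden1_alt nodo edges visitados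
instance (nodo : String) (edges : List (String × String)) (visitados : Option (List String)) (out : List String) : Decidable (Spec_PostOrden1 nodo edges visitados out) := by unfold Spec_PostOrden1; infer_instance

-- ===== CLAIM (what is proved, stated in full; the proofs are below) =====
def Claim_equal_PostOrden1 : Prop := ∀ (nodo : String) (edges : List (String × String)) (visitados : Option (List String)), Dom_PostOrden1 nodo edges visitados → Spec_PostOrden1 nodo edges visitados (PostOrden1 nodo edges visitados)

-- ===== LEMMAS AND PROOFS =====
lemma A_unfold (nodo : String) (edges : List (String × String)) (visitados : Option (List String)) :
    PostOrden1 nodo edges visitados =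
      (match (encontrarHijos1 nodo edges)[1]? with
       | some h1 => PostOrden1 h1 edges (some (match (encontrarHijos1 nodo edges).head? with
           | some h0 => PostOrden1 h0 edges (some (visitados.getD []))
           | none => visitados.getD []))
       | none => (match (encontrarHijos1 nodo edges).head? with
           | some h0 => PostOrden1 h0 edges (some (visitados.getD []))
           | none => visitados.getD [])) ++ [nodo] := by
  rw [PostOrden1]
  split <;> split <;> simp_all

lemma alt_unfold (nodo : String) (edges : List (String × String)) (visitados : Option (List String)) :
    PostOrden1_alt nodo edges visitados =
      (pvChildren.getD nodo []).foldl (fun v c => PostOrden1_alt c edges (some v)) (visitados.getD []) ++ [nodo] := by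
  rw [PostOrden1_alt]
  simp

lemma agree (k : Nat) : ∀ (nodo : String) (edges : List (String × String)) (visitados : Option (List String)),
    pvRank nodo ≤ k → PostOrden1 nodo edges visitados = PostOrden1_alt nodo edges visitados := by
  induction k with
  | zero =>
    intro nodo edges visitados hk
    have hz : pvRank nodo = 0 := Nat.le_zero.mp hk
    have hc : (edges1.filter (fun p => p.1 == nodo)).map (·.2) = ([] : List String) := by
      rw [children_char]; simp only [pvRank] at hz; split_ifs at hz <;> simp_all
    rw [A_unfold, alt_unfold, encontrarHijos1_filter, pvChildren_filter, hc]
    rfl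
  | succ k ih =>
    intro nodo edges visitados hk
    rw [A_unfold, alt_unfold, encontrarHijos1_filter, pvChildren_filter]
    rcases hhs : (edges1.filter (fun p => p.1 == nodo)).map (·.2) with _ | ⟨c0, _ | ⟨c1, rest⟩⟩
    · rw [hhs]; rfl
    · have h0 : pvRank c0 ≤ k := Nat.lt_succ_iff.mp (lt_of_lt_of_le
        (pvRank_head nodo edges c0 (by rw [encontrarHijos1_filter, hhs]; rfl)) hk)
      rw [hhs]
      simp only [List.head?, List.getElem?_cons_succ, List.getElem?_cons_zero, List.getElem?_nil, List.foldl]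
      rw [ih c0 edges (some (visitados.getD [])) h0]
    · have hrest : rest = [] := by
        have h := children_char nodo; rw [hhs] at h; split_ifs at h <;> simp_all
      subst hrest
      have h0 : pvRank c0 ≤ k := Nat.lt_succ_iff.mp (lt_of_lt_of_le
        (pvRank_head nodo edges c0 (by rw [encontrarHijos1_filter, hhs]; rfl)) hk)
      have h1 : pvRank c1 ≤ k := Nat.lt_succ_iff.mp (lt_of_lt_of_le
        (pvRank_second nodo edges c1 (by rw [encontrarHijos1_filter, hhs]; rfl)) hk)
      rw [hhs]
      simp only [List.head?, List.getElem?_cons_succ, List.getElem?_cons_zero, List.getElem?_nil, List.foldl]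
      rw [ih c0 edges (some (visitados.getD [])) h0, ih c1 edges _ h1]

-- ===== VERDICT (by name: the statement is the Claim_ definition above) =====
theorem PostOrden1_spec : Claim_equal_PostOrden1 := by
  intro nodo edges visitados _
  unfold Spec_PostOrden1
  exact agree (pvRank nodo) nodo edges visitados le_rfl
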